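-- pv_equiv track=rewrite | github.com/mocainteractive/serp-video-visibility | app.py | detect_domains_top10
-- ===== SOURCE A (Python) =====
-- SOCIAL = {
--     "YouTube": {
--         "domains": ["youtube.com", "youtu.be", "m.youtube.com"],
--         "sources": ["youtube"],
--         "relaxed": ["youtube"]  # parole chiave per match rilassato
--     },
--     "TikTok": {
--         "domains": [
--             "tiktok.com", "vm.tiktok.com", "vt.tiktok.com", "m.tiktok.com",
--             "tiktokv.com", "tiktokcdn.com"  # spesso in thumbnail/CDN
--         ],
--         "sources": ["tiktok"],
--         "relaxed": ["tiktok"]  # parole chiave per match rilassato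
--     },
--     "Instagram": {
--         "domains": ["instagram.com", "m.instagram.com"],
--         "sources": ["instagram"],
--         "relaxed": ["instagram", "ig "]  # 'ig ' per evitare falsi positivi
--     },
-- }
--
-- def _to_str(s):
--     return s if isinstance(s, str) else ""
--
-- def detect_domains_top10(organic):
--     """
--     Presenza domini nella Top 10 organica + prima posizione (1-based).
--     """
--     presence = {k: False for k in SOCIAL.keys()}
--     first_pos = {k: None for k in SOCIAL.keys()}
--
--     top10 = (organic or [])[:10]
--     for idx, res in enumerate(top10, start=1):
--         link = _to_str(res.get("link", "")).lower()
--         displayed = _to_str(res.get("displayedLink", "")).lower()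
--         for label, cfg in SOCIAL.items():
--             if any(dom in link for dom in cfg["domains"]) or any(dom in displayed for dom in cfg["domains"]):
--                 presence[label] = True
--                 if first_pos[label] is None:
--                     first_pos[label] = idx
--     return presence, first_pos
-- ===== SOURCE B (Python) =====
-- SOCIAL = {
--     "YouTube": {
--         "domains": ["youtube.com", "youtu.be", "m.youtube.com"],
--         "sources": ["youtube"],
--         "relaxed": ["youtube"],
--     },
--     "TikTok": {
--         "domains": [
--             "tiktok.com", "vm.tiktok.com", "vt.tiktok.com", "m.tiktok.com",
--             "tiktokv.com", "tiktokcdn.com"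
--         ],
--         "sources": ["tiktok"],
--         "relaxed": ["tiktok"],
--     },
--     "Instagram": {
--         "domains": ["instagram.com", "m.instagram.com"],
--         "sources": ["instagram"],
--         "relaxed": ["instagram", "ig "],
--     },
-- }
--
-- def _str(s):
--     return s if isinstance(s, str) else ""
--
-- def detect_domains_top10(organic):
--     """Presence of social domains in the organic top 10 + first 1-based position."""
--     # one pass: precompute the lowercased (link, displayedLink) table
--     rows = [(_str(res.get("link", "")).lower(), _str(res.get("displayedLink", "")).lower())
--             for res in (organic or [])[:10]]
--     presence, first_pos = {}, {}
--     for label, cfg in SOCIAL.items():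
--         doms = cfg["domains"]
--         pos = next((i for i, (lk, dl) in enumerate(rows, 1)
--                     if any(d in lk for d in doms) or any(d in dl for d in doms)), None)
--         presence[label] = pos is not None
--         first_pos[label] = pos
--     return presence, first_pos
-- ===== Notes on version B (the rewrite author's own statement) =====
-- stated objective: alternative
-- what changed: Swapped the loop nesting: B precomputes the lowercased (link, displayedLink) table in one pass, then for each social label finds the first 1-based matching index directly with next(); presence is derived as 'pos is not None' instead of maintained flag dicts.
import Mathlib
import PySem

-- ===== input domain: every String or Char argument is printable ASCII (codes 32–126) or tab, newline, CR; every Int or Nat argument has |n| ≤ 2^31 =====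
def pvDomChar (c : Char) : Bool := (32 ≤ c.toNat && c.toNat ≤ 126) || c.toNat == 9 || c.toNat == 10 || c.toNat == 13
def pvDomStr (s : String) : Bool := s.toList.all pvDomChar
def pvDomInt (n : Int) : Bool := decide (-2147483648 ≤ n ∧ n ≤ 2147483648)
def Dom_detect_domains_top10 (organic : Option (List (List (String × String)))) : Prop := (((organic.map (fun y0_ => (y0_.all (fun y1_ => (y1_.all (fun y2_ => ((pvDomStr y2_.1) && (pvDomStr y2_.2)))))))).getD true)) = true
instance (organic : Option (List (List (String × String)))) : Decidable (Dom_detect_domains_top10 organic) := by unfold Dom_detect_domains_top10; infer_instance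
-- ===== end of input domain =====

-- B swaps the loop nesting: it precomputes the lowercased (link, displayedLink) table once, then finds
-- each label's first 1-based match directly (presence derived from it) — alternative decomposition, same cost.


-- ===== PORT A =====
-- SOCIAL, restricted to its "domains" field (the only one detect_domains_top10 reads)
def pvSocial : List (String × List String) :=
  [("YouTube", ["youtube.com", "youtu.be", "m.youtube.com"]),
   ("TikTok", ["tiktok.com", "vm.tiktok.com", "vt.tiktok.com", "m.tiktok.com", "tiktokv.com", "tiktokcdn.com"]),
   ("Instagram", ["instagram.com", "m.instagram.com"])]

-- body of A's outer loop (one result `ir.2` at 1-based index `ir.1`); _to_str is the identity here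
-- because the dict values are Strings by type
def pvStep (st : PySem.Dict String Bool × PySem.Dict String (Option Int))
    (ir : Int × List (String × String)) :
    PySem.Dict String Bool × PySem.Dict String (Option Int) :=
  let link := PySem.Str.lower ((PySem.Dict.mk ir.2).getD "link" "")
  let displayed := PySem.Str.lower ((PySem.Dict.mk ir.2).getD "displayedLink" "")
  pvSocial.foldl (fun st p =>
    if p.2.any (fun dom => PySem.Str.isIn dom link) || p.2.any (fun dom => PySem.Str.isIn dom displayed) then
      (st.1.insert p.1 true,
       if st.2.getD p.1 none = none then st.2.insert p.1 (some ir.1) else st.2)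
    else st) st

def detect_domains_top10 (organic : Option (List (List (String × String)))) :
    (List (String × Bool)) × (List (String × Option Int)) :=
  let presence : PySem.Dict String Bool :=
    pvSocial.foldl (fun d p => d.insert p.1 false) PySem.Dict.empty
  let first_pos : PySem.Dict String (Option Int) :=
    pvSocial.foldl (fun d p => d.insert p.1 none) PySem.Dict.empty
  let top10 := PySem.List.slice (organic.getD []) none (some 10)
  let st := (PySem.List.enumerate top10 1).foldl pvStep (presence, first_pos)
  (st.1.items, st.2.items)

-- ===== PORT B =====
-- one preparatory pass: the lowercased (link, displayedLink) row of one result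
def pvRowOf (res : List (String × String)) : String × String :=
  (PySem.Str.lower ((PySem.Dict.mk res).getD "link" ""),
   PySem.Str.lower ((PySem.Dict.mk res).getD "displayedLink" ""))

-- next((i for i, (lk, dl) in enumerate(rows, 1) if any(d in lk …) or any(d in dl …)), None)
def pvFirstPos (doms : List String) (rows : List (String × String)) : Option Int :=
  ((PySem.List.enumerate rows 1).find?
    (fun q => doms.any (fun d => PySem.Str.isIn d q.2.1) || doms.any (fun d => PySem.Str.isIn d q.2.2))).map (·.1)

def detect_domains_top10_alt (organic : Option (List (List (String × String)))) :
    (List (String × Bool)) × (List (String × Option Int)) :=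
  let rows := (PySem.List.slice (organic.getD []) none (some 10)).map pvRowOf
  let hits := pvSocial.map (fun p => (p.1, pvFirstPos p.2 rows))
  (hits.map (fun q => (q.1, q.2.isSome)), hits)

-- ===== PRECONDITION & SPEC =====
def Spec_detect_domains_top10 (organic : Option (List (List (String × String)))) (out : (List (String × Bool)) × (List (String × Option Int))) : Prop := out = detect_domains_top10_alt organic
instance (organic : Option (List (List (String × String)))) (out : (List (String × Bool)) × (List (String × Option Int))) : Decidable (Spec_detect_domains_top10 organic out) := by unfold Spec_detect_domains_top10; infer_instance

-- ===== CLAIM (what is proved, stated in full; the proofs are below) =====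
def Claim_equal_detect_domains_top10 : Prop := ∀ (organic : Option (List (List (String × String)))), Dom_detect_domains_top10 organic → Spec_detect_domains_top10 organic (detect_domains_top10 organic)

-- ===== LEMMAS AND PROOFS =====

-- the three domain lists of pvSocial, named
def pvDY : List String := ["youtube.com", "youtu.be", "m.youtube.com"]
def pvDT : List String := ["tiktok.com", "vm.tiktok.com", "vt.tiktok.com", "m.tiktok.com", "tiktokv.com", "tiktokcdn.com"]
def pvDI : List String := ["instagram.com", "m.instagram.com"]

-- one label's match test against a (link, displayed) pair / against a raw result
def pvCond (doms : List String) (link displayed : String) : Bool :=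
  doms.any (fun dom => PySem.Str.isIn dom link) || doms.any (fun dom => PySem.Str.isIn dom displayed)
def pvHit (doms : List String) (res : List (String × String)) : Bool :=
  pvCond doms (pvRowOf res).1 (pvRowOf res).2

-- A's per-label state update, with the match condition abstracted to a Bool
def pvUpd (s : PySem.Dict String Bool × PySem.Dict String (Option Int)) (c : Bool) (label : String) (i : Int) :
    PySem.Dict String Bool × PySem.Dict String (Option Int) :=
  if c = true then
    (s.1.insert label true, if s.2.getD label none = none then s.2.insert label (some i) else s.2)
  else s

def pvInner (cY cT cI : Bool) (i : Int) (b1 b2 b3 : Bool) (f1 f2 f3 : Option Int) :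
    PySem.Dict String Bool × PySem.Dict String (Option Int) :=
  pvUpd (pvUpd (pvUpd (PySem.Dict.mk [("YouTube", b1), ("TikTok", b2), ("Instagram", b3)],
                       PySem.Dict.mk [("YouTube", f1), ("TikTok", f2), ("Instagram", f3)])
           cY "YouTube" i) cT "TikTok" i) cI "Instagram" i

-- pvStep on a state of this shape IS pvInner with the three match conditions plugged in
lemma pvStep_rfl (ir : Int × List (String × String)) (b1 b2 b3 : Bool) (f1 f2 f3 : Option Int) :
    pvStep (PySem.Dict.mk [("YouTube", b1), ("TikTok", b2), ("Instagram", b3)],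
            PySem.Dict.mk [("YouTube", f1), ("TikTok", f2), ("Instagram", f3)]) ir =
    pvInner (pvHit pvDY ir.2) (pvHit pvDT ir.2) (pvHit pvDI ir.2) ir.1 b1 b2 b3 f1 f2 f3 := rfl

set_option maxHeartbeats 1000000 in
lemma pvInner_eq (cY cT cI : Bool) (i : Int) (b1 b2 b3 : Bool) (f1 f2 f3 : Option Int) :
    pvInner cY cT cI i b1 b2 b3 f1 f2 f3 =
    (PySem.Dict.mk [("YouTube", if cY then true else b1),
                    ("TikTok", if cT then true else b2),
                    ("Instagram", if cI then true else b3)],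
     PySem.Dict.mk [("YouTube", if cY then (if f1 = none then some i else f1) else f1),
                    ("TikTok", if cT then (if f2 = none then some i else f2) else f2),
                    ("Instagram", if cI then (if f3 = none then some i else f3) else f3)]) := by
  cases cY <;> cases cT <;> cases cI <;> cases f1 <;> cases f2 <;> cases f3 <;> rfl

-- first_pos value left for one label after scanning `l` starting at index i with current value f
def pvFu (doms : List String) (l : List (List (String × String))) (i : Int) (f : Option Int) : Option Int :=
  match f with
  | some v => some v
  | none => ((PySem.List.enumerate l i).find? (fun q => pvHit doms q.2)).map (·.1)

lemma pvFu_nil (doms : List String) (i : Int) (f : Option Int) : pvFu doms [] i f = f := by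
  cases f <;> simp [pvFu, PySem.List.enumerate]

lemma pvFu_cons (doms : List String) (r : List (String × String)) (l : List (List (String × String)))
    (i : Int) (f : Option Int) :
    pvFu doms l (i + 1) (if pvHit doms r then (if f = none then some i else f) else f)
      = pvFu doms (r :: l) i f := by
  cases f <;> by_cases h : pvHit doms r <;>
    simp [pvFu, PySem.List.enumerate_cons, h]

lemma pvBool_cons (p : List (String × String) → Bool) (r : List (String × String))
    (l : List (List (String × String))) (b : Bool) :
    ((if p r then true else b) || l.any p) = (b || (r :: l).any p) := by
  by_cases h : p r <;> cases b <;> simp [h]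

lemma foldA (l : List (List (String × String))) (i : Int) (b1 b2 b3 : Bool) (f1 f2 f3 : Option Int) :
    (PySem.List.enumerate l i).foldl pvStep
      (PySem.Dict.mk [("YouTube", b1), ("TikTok", b2), ("Instagram", b3)],
       PySem.Dict.mk [("YouTube", f1), ("TikTok", f2), ("Instagram", f3)]) =
    (PySem.Dict.mk [("YouTube", b1 || l.any (pvHit pvDY)),
                    ("TikTok", b2 || l.any (pvHit pvDT)),
                    ("Instagram", b3 || l.any (pvHit pvDI))],
     PySem.Dict.mk [("YouTube", pvFu pvDY l i f1),
                    ("TikTok", pvFu pvDT l i f2),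
                    ("Instagram", pvFu pvDI l i f3)]) := by
  induction l generalizing i b1 b2 b3 f1 f2 f3 with
  | nil => simp [PySem.List.enumerate, pvFu_nil]
  | cons r rest ih =>
    rw [PySem.List.enumerate_cons, List.foldl_cons, pvStep_rfl, pvInner_eq, ih]
    rw [pvBool_cons, pvBool_cons, pvBool_cons, pvFu_cons, pvFu_cons, pvFu_cons]

lemma enumMap (l : List (List (String × String))) (s : Int) :
    PySem.List.enumerate (l.map pvRowOf) s
      = (PySem.List.enumerate l s).map (fun q => (q.1, pvRowOf q.2)) := by
  induction l generalizing s with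
  | nil => simp [PySem.List.enumerate]
  | cons r rest ih =>
    rw [List.map_cons, PySem.List.enumerate_cons, PySem.List.enumerate_cons, List.map_cons, ih]

lemma firstPos_eq (doms : List String) (l : List (List (String × String))) :
    pvFirstPos doms (l.map pvRowOf) = pvFu doms l 1 none := by
  simp only [pvFirstPos, pvFu, enumMap, List.find?_map, Option.map_map]
  rfl

lemma isSome_pvFu (doms : List String) (l : List (List (String × String))) :
    (pvFu doms l 1 none).isSome = l.any (pvHit doms) := by
  simp only [pvFu]
  suffices h : ∀ (s : Int), (((PySem.List.enumerate l s).find? (fun q => pvHit doms q.2)).map (·.1)).isSome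
      = l.any (pvHit doms) from h 1
  induction l with
  | nil => simp [PySem.List.enumerate]
  | cons r rest ih =>
    intro s
    rw [PySem.List.enumerate_cons]
    by_cases h : pvHit doms r <;> simp [h, ih]

-- ===== VERDICT (by name: the statement is the Claim_ definition above) =====
theorem detect_domains_top10_spec : Claim_equal_detect_domains_top10 := by
  intro organic _
  unfold Spec_detect_domains_top10 detect_domains_top10 detect_domains_top10_alt
  have hinit : pvSocial.foldl (fun d p => d.insert p.1 false) PySem.Dict.empty
      = PySem.Dict.mk [("YouTube", false), ("TikTok", false), ("Instagram", false)] := rfl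
  have hinit2 : pvSocial.foldl (fun (d : PySem.Dict String (Option Int)) p => d.insert p.1 none) PySem.Dict.empty
      = PySem.Dict.mk [("YouTube", (none : Option Int)), ("TikTok", none), ("Instagram", none)] := rfl
  simp only [hinit, hinit2, foldA]
  simp [pvSocial, pvDY, pvDT, pvDI, firstPos_eq, isSome_pvFu]
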